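-- pv_equiv track=rewrite | github.com/HidetoraSama/PythonArboles | Arboles.py | enListaDeListas
-- ===== SOURCE A (Python) =====
-- def enListaDeListas(lista, v, f, c):
--     if len(lista) == f:
--         return 0, -1
--
--     if len(lista[f]) == c:
--         return enListaDeListas(lista, v, f + 1, 0)
--
--     if (lista[f][c] == v):
--         return f, c
--
--     return enListaDeListas(lista, v, f, c + 1)
-- ===== SOURCE B (Python) =====
-- def enListaDeListas(lista, v, f, c):
--     n = len(lista)
--     while f != n:
--         fila = lista[f]
--         m = len(fila)
--         while c != m:
--             if fila[c] == v:
--                 return f, c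
--             c += 1
--         f += 1
--         c = 0
--     return 0, -1
-- ===== Notes on version B (the rewrite author's own statement) =====
-- stated objective: idiomatic
-- what changed: Replaced A's single self-recursion over the pair (f,c) by an iterative scan with two nested while loops maintaining f and c, the way an experienced Python developer would write the search (no recursion depth limit).
import Mathlib
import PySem

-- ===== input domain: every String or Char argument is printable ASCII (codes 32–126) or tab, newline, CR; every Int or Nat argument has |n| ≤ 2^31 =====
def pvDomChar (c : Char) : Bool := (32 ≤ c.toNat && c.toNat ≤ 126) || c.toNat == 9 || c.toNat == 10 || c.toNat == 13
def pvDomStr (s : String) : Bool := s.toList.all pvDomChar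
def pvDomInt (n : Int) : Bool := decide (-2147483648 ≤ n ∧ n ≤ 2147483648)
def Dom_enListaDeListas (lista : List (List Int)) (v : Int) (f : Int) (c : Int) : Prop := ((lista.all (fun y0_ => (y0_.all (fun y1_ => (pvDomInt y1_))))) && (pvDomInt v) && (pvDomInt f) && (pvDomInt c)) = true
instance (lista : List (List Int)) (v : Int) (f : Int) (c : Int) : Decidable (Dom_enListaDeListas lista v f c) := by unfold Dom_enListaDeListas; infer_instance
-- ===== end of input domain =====

-- B replaces A's single self-recursion over the pair (f, c) by an iterative scan with two
-- nested loops (inner over the columns of one row, outer over the rows); same cost, idiomatic form.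


-- ===== PORT A =====
-- Literal port of A's single self-recursion; pyGet? = none is Python's IndexError
-- (excluded by Pre_), where the port returns the default (0, -1).
def enListaDeListas (lista : List (List Int)) (v : Int) (f : Int) (c : Int) : Int × Int :=
  if (lista.length : Int) = f then (0, -1)
  else
    match hrow : PySem.List.pyGet? lista f with
    | none => (0, -1)  -- IndexError in Python
    | some row =>
      if (row.length : Int) = c then enListaDeListas lista v (f + 1) 0
      else
        match hx : PySem.List.pyGet? row c with
        | none => (0, -1)  -- IndexError in Python
        | some x =>
          if x = v then (f, c)
          else enListaDeListas lista v f (c + 1)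
termination_by (((lista.length : Int) - f).toNat,
                (((PySem.List.pyGet? lista f).getD []).length - c).toNat)
decreasing_by
  · have hf : f < (lista.length : Int) := by
      by_contra hge
      have hnone : PySem.List.pyGet? lista f = none := by
        rw [PySem.List.pyGet?_eq_none_iff]; intro hin; exact hge hin.2
      simp [hnone] at hrow
    exact Prod.Lex.left _ _ (by omega)
  · have hc : c < (row.length : Int) := by
      by_contra hge
      have hnone : PySem.List.pyGet? row c = none := by
        rw [PySem.List.pyGet?_eq_none_iff]; intro hin; exact hge hin.2
      simp [hnone] at hx
    rw [hrow]
    simp only [Option.getD_some]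
    exact Prod.Lex.right _ (by omega)

-- ===== PORT B =====
-- Port of B's inner `while c != m` loop over one row: `some r` = early return r,
-- `none` = the loop exhausted the row.
def altRowScan (fila : List Int) (v : Int) (f : Int) (c : Int) : Option (Int × Int) :=
  if (fila.length : Int) = c then none
  else
    match hx : PySem.List.pyGet? fila c with
    | none => some (0, -1)  -- IndexError in Python
    | some x =>
      if x = v then some (f, c)
      else altRowScan fila v f (c + 1)
termination_by ((fila.length : Int) - c).toNat
decreasing_by
  have hc : c < (fila.length : Int) := by
    by_contra hge
    have hnone : PySem.List.pyGet? fila c = none := by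
      rw [PySem.List.pyGet?_eq_none_iff]; intro hin; exact hge hin.2
    simp [hnone] at hx
  omega

-- Port of B's outer `while f != n` loop.
def enListaDeListas_alt (lista : List (List Int)) (v : Int) (f : Int) (c : Int) : Int × Int :=
  if (lista.length : Int) = f then (0, -1)
  else
    match hrow : PySem.List.pyGet? lista f with
    | none => (0, -1)  -- IndexError in Python
    | some fila =>
      match altRowScan fila v f c with
      | some r => r
      | none => enListaDeListas_alt lista v (f + 1) 0
termination_by ((lista.length : Int) - f).toNat
decreasing_by
  have hf : f < (lista.length : Int) := by
    by_contra hge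
    have hnone : PySem.List.pyGet? lista f = none := by
      rw [PySem.List.pyGet?_eq_none_iff]; intro hin; exact hge hin.2
    simp [hnone] at hrow
  omega

-- ===== PRECONDITION & SPEC =====
-- Pre_ excludes exactly the inputs on which Python A raises IndexError: f outside
-- [-len(lista), len(lista)], or (when f addresses a row, possibly by a negative index)
-- a starting column c outside [-len(lista[f]), len(lista[f])].
def Pre_enListaDeListas (lista : List (List Int)) (v : Int) (f : Int) (c : Int) : Prop :=
  -(lista.length : Int) ≤ f ∧ f ≤ (lista.length : Int) ∧
  (∀ row ∈ PySem.List.pyGet? lista f, -(row.length : Int) ≤ c ∧ c ≤ (row.length : Int))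

instance (lista : List (List Int)) (v : Int) (f : Int) (c : Int) : Decidable (Pre_enListaDeListas lista v f c) := by unfold Pre_enListaDeListas; infer_instance

def pvWitness_enListaDeListas : List (List Int) × Int × Int × Int := ([[1, 2], [3, 4]], 3, 0, 0)

def Spec_enListaDeListas (lista : List (List Int)) (v : Int) (f : Int) (c : Int) (out : Int × Int) : Prop := out = enListaDeListas_alt lista v f c
instance (lista : List (List Int)) (v : Int) (f : Int) (c : Int) (out : Int × Int) : Decidable (Spec_enListaDeListas lista v f c out) := by unfold Spec_enListaDeListas; infer_instance

-- ===== CLAIM (what is proved, stated in full; the proofs are below) =====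
def Claim_equal_enListaDeListas : Prop := ∀ (lista : List (List Int)) (v : Int) (f : Int) (c : Int), Dom_enListaDeListas lista v f c → Pre_enListaDeListas lista v f c → Spec_enListaDeListas lista v f c (enListaDeListas lista v f c)

-- ===== LEMMAS AND PROOFS =====

-- One-step equation for port A with plain (binderless) matches, convenient to rewrite with.
theorem enListaDeListas_eq (lista : List (List Int)) (v f c : Int) :
    enListaDeListas lista v f c =
      if (lista.length : Int) = f then (0, -1)
      else
        match PySem.List.pyGet? lista f with
        | none => (0, -1)
        | some row =>
          if (row.length : Int) = c then enListaDeListas lista v (f + 1) 0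
          else
            match PySem.List.pyGet? row c with
            | none => (0, -1)
            | some x => if x = v then (f, c) else enListaDeListas lista v f (c + 1) := by
  by_cases hf : (lista.length : Int) = f
  · rw [enListaDeListas]; simp [hf]
  · rw [enListaDeListas, if_neg hf, if_neg hf]
    split
    · next h => rw [h]
    · next row h =>
      rw [h]
      dsimp only
      by_cases hc : (row.length : Int) = c
      · simp [hc]
      · rw [if_neg hc, if_neg hc]
        split
        · next h2 => rw [h2]
        · next x h2 => rw [h2]

-- One-step equation for B's inner loop.
theorem altRowScan_eq (fila : List Int) (v f c : Int) :
    altRowScan fila v f c =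
      if (fila.length : Int) = c then none
      else
        match PySem.List.pyGet? fila c with
        | none => some (0, -1)
        | some x => if x = v then some (f, c) else altRowScan fila v f (c + 1) := by
  by_cases hc : (fila.length : Int) = c
  · rw [altRowScan]; simp [hc]
  · rw [altRowScan, if_neg hc, if_neg hc]
    split
    · next h => rw [h]
    · next x h => rw [h]

-- One-step equation for B's outer loop.
theorem enListaDeListas_alt_eq (lista : List (List Int)) (v f c : Int) :
    enListaDeListas_alt lista v f c =
      if (lista.length : Int) = f then (0, -1)
      else
        match PySem.List.pyGet? lista f with
        | none => (0, -1)
        | some fila =>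
          match altRowScan fila v f c with
          | some r => r
          | none => enListaDeListas_alt lista v (f + 1) 0 := by
  by_cases hf : (lista.length : Int) = f
  · rw [enListaDeListas_alt]; simp [hf]
  · rw [enListaDeListas_alt, if_neg hf, if_neg hf]
    split
    · next h => rw [h]
    · next fila h => rw [h]

-- A's recursion along one fixed row f equals B's inner row scan followed, if the row is
-- exhausted, by moving to the next row exactly as A does.
theorem enListaDeListas_row (lista : List (List Int)) (v f : Int) (row : List Int)
    (hrow : PySem.List.pyGet? lista f = some row) (hf : f < (lista.length : Int)) :
    ∀ c, enListaDeListas lista v f c =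
      (match altRowScan row v f c with
        | some r => r
        | none => enListaDeListas lista v (f + 1) 0) := by
  intro c
  induction hm : ((row.length : Int) - c).toNat using Nat.strong_induction_on generalizing c with
  | _ n ih =>
    rw [enListaDeListas_eq, if_neg (by omega), hrow, altRowScan_eq]
    dsimp only
    by_cases hc : (row.length : Int) = c
    · simp [hc]
    · rw [if_neg hc, if_neg hc]
      cases hx : PySem.List.pyGet? row c with
      | none => rfl
      | some x =>
        dsimp only
        have hlt : c < (row.length : Int) := by
          by_contra hge
          have hnone : PySem.List.pyGet? row c = none := by
            rw [PySem.List.pyGet?_eq_none_iff]; intro hin; exact hge hin.2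
          simp [hnone] at hx
        by_cases hv : x = v
        · simp [hv]
        · rw [if_neg hv, if_neg hv]
          exact ih (((row.length : Int) - (c + 1)).toNat) (by omega) (c + 1) rfl

theorem enListaDeListas_eq_alt (lista : List (List Int)) (v : Int) :
    ∀ f c, enListaDeListas lista v f c = enListaDeListas_alt lista v f c := by
  intro f
  induction hm : ((lista.length : Int) - f).toNat using Nat.strong_induction_on generalizing f with
  | _ n ih =>
    intro c
    rw [enListaDeListas_alt_eq]
    by_cases hf : (lista.length : Int) = f
    · rw [enListaDeListas_eq]; simp [hf]
    · rw [if_neg hf]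
      cases hrow : PySem.List.pyGet? lista f with
      | none => rw [enListaDeListas_eq, if_neg hf, hrow]
      | some row =>
        have hflt : f < (lista.length : Int) := by
          by_contra hge
          have hnone : PySem.List.pyGet? lista f = none := by
            rw [PySem.List.pyGet?_eq_none_iff]; intro hin; exact hge hin.2
          simp [hnone] at hrow
        rw [enListaDeListas_row lista v f row hrow hflt c]
        dsimp only
        cases altRowScan row v f c with
        | some r => rfl
        | none =>
          exact ih (((lista.length : Int) - (f + 1)).toNat) (by omega) (f + 1) rfl 0

-- ===== VERDICT (by name: the statement is the Claim_ definition above) =====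
theorem enListaDeListas_spec : Claim_equal_enListaDeListas := by
  intro lista v f c _ _
  exact enListaDeListas_eq_alt lista v f c
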